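-- pv_equiv track=rewrite | github.com/hoijoii/CodingTest-Algorithm | Greedy/greedy_gym_clothes(level1).py | solution
-- ===== SOURCE A (Python) =====
-- def solution(n, lost, reverse):
--
--     lost.sort()
--     reverse.sort()
--
--     attend = [i for i in range(1, n + 1) if i not in lost]
--
--     new_reverse=[]
--     new_lost=[]
--
--     for i in reverse:
--         if i not in lost:
--             new_reverse.append(i)
--         else:
--             attend.append(i)
--
--     for i in lost:
--         if i not in reverse:
--             new_lost.append(i)
--
--     for i in new_reverse:
--         if i - 1 in new_lost:
--             attend.append(i - 1)
--             new_lost.remove(i - 1)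
--
--         elif i + 1 in new_lost:
--             attend.append(i + 1)
--             new_lost.remove(i + 1)
--
--     answer = len(attend)
--
--     return answer
-- ===== SOURCE B (Python) =====
-- def solution(n, lost, reverse):
--     # in-place sorts kept: A mutates its arguments the same way
--     lost.sort()
--     reverse.sort()
--
--     # one merge pass over the two sorted lists: split into students who only lost,
--     # students who only have a spare, and count of spares belonging to lost students
--     only_lost = []
--     only_rev = []
--     both = 0
--     i = j = 0
--     while i < len(lost) and j < len(reverse):
--         if lost[i] < reverse[j]:
--             only_lost.append(lost[i])
--             i += 1
--         elif lost[i] > reverse[j]: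
--             only_rev.append(reverse[j])
--             j += 1
--         else:
--             v = lost[i]
--             while i < len(lost) and lost[i] == v:
--                 i += 1
--             while j < len(reverse) and reverse[j] == v:
--                 both += 1
--                 j += 1
--     only_lost.extend(lost[i:])
--     only_rev.extend(reverse[j:])
--
--     # base attendance: n minus the number of distinct lost values inside 1..n
--     d = 0
--     prev = None
--     for x in lost:
--         if 1 <= x <= n and x != prev:
--             d += 1
--         prev = x
--     base = max(n, 0) - d
--
--     # two-pointer sweep over the sorted, value-disjoint lists: a lender at r serves
--     # r-1 if present, else r+1; smaller values can never be served later
--     lends = 0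
--     i = j = 0
--     while i < len(only_lost) and j < len(only_rev):
--         l, r = only_lost[i], only_rev[j]
--         if l < r - 1:
--             i += 1
--         elif l == r - 1 or l == r + 1:
--             lends += 1
--             i += 1
--             j += 1
--         else:
--             j += 1
--     return base + both + lends
-- ===== Notes on version B (the rewrite author's own statement) =====
-- stated objective: faster
-- what changed: B replaces A's membership-scan passes (the O(n*m) range comprehension, the 'in lost'/'in reverse' list scans and the per-lender 'in new_lost' + remove() pass) by sorted-merge algorithms: one merge pass partitions the two sorted lists and counts overlaps, the attendance base is max(n,0) minus a distinct-count scan, and lending is a two-pointer sweep over the two sorted disjoint lists.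
import Mathlib
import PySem

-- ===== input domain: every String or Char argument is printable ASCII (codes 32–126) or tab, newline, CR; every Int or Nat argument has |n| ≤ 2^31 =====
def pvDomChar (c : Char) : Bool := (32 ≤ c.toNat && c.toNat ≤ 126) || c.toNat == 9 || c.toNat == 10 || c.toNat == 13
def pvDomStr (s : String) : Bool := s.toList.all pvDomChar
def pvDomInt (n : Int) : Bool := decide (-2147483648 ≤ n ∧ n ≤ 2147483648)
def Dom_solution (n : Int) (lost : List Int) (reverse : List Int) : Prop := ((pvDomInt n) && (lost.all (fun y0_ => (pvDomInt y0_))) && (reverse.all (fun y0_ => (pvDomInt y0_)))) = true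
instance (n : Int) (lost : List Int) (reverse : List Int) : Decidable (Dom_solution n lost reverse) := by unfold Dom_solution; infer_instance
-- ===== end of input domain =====

-- B replaces A's membership-scan passes (the O(n·m) range comprehension, the 'in lost'/'in
-- reverse' list scans, and the per-lender 'in new_lost' + remove() pass) by sorted-merge
-- algorithms: one merge pass partitions the two sorted lists, a distinct-count scan gives the
-- attendance base in closed form, and lending is a two-pointer sweep.  Both versions sort
-- lost/reverse in place (return-value equivalence; the mutation is identical).

-- ===== PORT A =====
-- for i in reverse: if i not in lost: new_reverse.append(i) else: attend.append(i)   (state = (attend, new_reverse))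
def aStep1 (lost : List Int) (s : List Int × List Int) (i : Int) : List Int × List Int :=
  if !(lost.contains i) then (s.1, s.2 ++ [i]) else (s.1 ++ [i], s.2)

-- the third for-loop's body (state = (attend, new_lost)); new_lost.remove(x) is guarded by
-- 'x in new_lost', so '(remove? …).getD s.2' is exact (the default is never taken)
def aGreedy (s : List Int × List Int) (i : Int) : List Int × List Int :=
  if s.2.contains (i - 1) then (s.1 ++ [i - 1], (PySem.List.remove? s.2 (i - 1)).getD s.2)
  else if s.2.contains (i + 1) then (s.1 ++ [i + 1], (PySem.List.remove? s.2 (i + 1)).getD s.2)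
  else s

def solution (n : Int) (lost : List Int) (reverse : List Int) : Int :=
  let lost := PySem.List.sorted lost (fun x => x) false
  let reverse := PySem.List.sorted reverse (fun x => x) false
  let attend := (PySem.List.pyRange 1 (n + 1) 1).filter (fun i => !(lost.contains i))
  let p := reverse.foldl (aStep1 lost) (attend, [])
  let new_lost := lost.foldl (fun acc i => if !(reverse.contains i) then acc ++ [i] else acc) ([] : List Int)
  let q := p.2.foldl aGreedy (p.1, new_lost)
  (q.1.length : Int)

-- ===== PORT B =====
-- the merge pass: split the two sorted lists into (only_lost, only_reverse, both-count);
-- the two inner value-skipping whiles of Source B are the takeWhile/dropWhile runs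
def bMerge : List Int → List Int → List Int × List Int × Int
  | ls, [] => (ls, [], 0)
  | [], r :: rs => ([], r :: rs, 0)
  | l :: ls, r :: rs =>
    if l < r then
      let p := bMerge ls (r :: rs)
      (l :: p.1, p.2.1, p.2.2)
    else if r < l then
      let p := bMerge (l :: ls) rs
      (p.1, r :: p.2.1, p.2.2)
    else
      let k := ((r :: rs).takeWhile (fun x => x == l)).length
      let p := bMerge (ls.dropWhile (fun x => x == l)) ((r :: rs).dropWhile (fun x => x == l))
      (p.1, p.2.1, p.2.2 + (k : Int))
termination_by ls rs => ls.length + rs.length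
decreasing_by
  · simp
  · simp
  · have h1 := List.length_dropWhile_le (fun x => x == l) ls
    have hrl : l = r := by omega
    have h2 : ((r :: rs).dropWhile (fun x => x == l)) = rs.dropWhile (fun x => x == l) := by
      rw [List.dropWhile_cons_of_pos]; simp [hrl]
    have h3 := List.length_dropWhile_le (fun x => x == l) rs
    rw [h2]; simp only [List.length_cons]; omega

-- the two-pointer lending sweep of Source B (i/j indices become the remaining suffixes)
def bLend : List Int → List Int → Int
  | [], _ => 0
  | _ :: _, [] => 0
  | l :: ls, r :: rs =>
    if l < r - 1 then bLend ls (r :: rs)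
    else if l == r - 1 || l == r + 1 then 1 + bLend ls rs
    else bLend (l :: ls) rs
termination_by ls rs => ls.length + rs.length

def solution_alt (n : Int) (lost : List Int) (reverse : List Int) : Int :=
  let lost := PySem.List.sorted lost (fun x => x) false
  let reverse := PySem.List.sorted reverse (fun x => x) false
  let m := bMerge lost reverse
  -- d = number of distinct lost values inside 1..n (lost is sorted, prev-scan)
  let d := (lost.foldl
    (fun (s : Option Int × Int) x =>
      if (1 ≤ x ∧ x ≤ n) ∧ some x ≠ s.1 then (some x, s.2 + 1) else (some x, s.2))
    (none, 0)).2
  let base := max n 0 - d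
  base + m.2.2 + bLend m.1 m.2.1

-- ===== PRECONDITION & SPEC =====
def Spec_solution (n : Int) (lost : List Int) (reverse : List Int) (out : Int) : Prop := out = solution_alt n lost reverse
instance (n : Int) (lost : List Int) (reverse : List Int) (out : Int) : Decidable (Spec_solution n lost reverse out) := by unfold Spec_solution; infer_instance

-- ===== CLAIM (what is proved, stated in full; the proofs are below) =====
def Claim_equal_solution : Prop := ∀ (n : Int) (lost : List Int) (reverse : List Int), Dom_solution n lost reverse → Spec_solution n lost reverse (solution n lost reverse)

-- ===== LEMMAS AND PROOFS =====

theorem aStep1_foldl (lost : List Int) (R att nrev : List Int) :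
    R.foldl (aStep1 lost) (att, nrev) =
      (att ++ R.filter (fun i => lost.contains i),
       nrev ++ R.filter (fun i => !(lost.contains i))) := by
  induction R generalizing att nrev with
  | nil => simp
  | cons i R ih =>
    by_cases h : i ∈ lost
    · simp [aStep1, h, ih]
    · simp [aStep1, h, ih]

theorem bLend_nil_right (T : List Int) : bLend T [] = 0 := by cases T <;> simp [bLend]

theorem gt_of_mem_dropWhile (v : Int) (xs : List Int) (hs : xs.Pairwise (· ≤ ·))
    (hge : ∀ x ∈ xs, v ≤ x) : ∀ x ∈ xs.dropWhile (fun y => y == v), v < x := by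
  induction xs with
  | nil => simp
  | cons a xs ih =>
    by_cases ha : a = v
    · rw [List.dropWhile_cons_of_pos (by simp [ha])]
      exact ih hs.tail (fun x hx => hge x (by simp [hx]))
    · rw [List.dropWhile_cons_of_neg (by simp [ha])]
      intro x hx
      rcases List.mem_cons.mp hx with h | h
      · subst h; exact lt_of_le_of_ne (hge x (by simp)) (Ne.symm ha)
      · exact lt_of_lt_of_le (lt_of_le_of_ne (hge a (by simp)) (Ne.symm ha))
          (List.rel_of_pairwise_cons hs h)

theorem bMerge_eq (ls rs : List Int) (hls : ls.Pairwise (· ≤ ·)) (hrs : rs.Pairwise (· ≤ ·)) :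
    bMerge ls rs =
      (ls.filter (fun x => !(rs.contains x)),
       rs.filter (fun x => !(ls.contains x)),
       ((rs.filter (fun x => ls.contains x)).length : Int)) := by
  induction ls, rs using bMerge.induct with
  | case1 ls => simp [bMerge]
  | case2 r rs => simp [bMerge]
  | case3 l ls r rs h ih =>
    have hall : ∀ x ∈ r :: rs, l < x := by
      intro x hx
      rcases List.mem_cons.mp hx with rfl | hx
      · exact h
      · exact lt_of_lt_of_le h (List.rel_of_pairwise_cons hrs hx)
    have hnm : l ∉ r :: rs := fun hm => absurd (hall l hm) (lt_irrefl l)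
    have hcong : ∀ x ∈ r :: rs, (!(l :: ls).contains x) = (!ls.contains x) := by
      intro x hx
      have hne : x ≠ l := (hall x hx).ne'
      simp [hne]
    have hcong2 : ∀ x ∈ r :: rs, ((l :: ls).contains x) = (ls.contains x) := by
      intro x hx
      have hne : x ≠ l := (hall x hx).ne'
      simp [hne]
    rw [bMerge]
    simp only [if_pos h]
    rw [ih hls.tail hrs]
    simp only [Prod.mk.injEq]
    refine ⟨?_, ?_, ?_⟩
    · rw [List.filter_cons_of_pos (by simp [hnm])]
    · exact (List.filter_congr hcong).symm
    · rw [List.filter_congr hcong2]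
  | case4 l ls r rs h h' ih =>
    have hall : ∀ x ∈ l :: ls, r < x := by
      intro x hx
      rcases List.mem_cons.mp hx with rfl | hx
      · exact h'
      · exact lt_of_lt_of_le h' (List.rel_of_pairwise_cons hls hx)
    have hnm : r ∉ l :: ls := fun hm => absurd (hall r hm) (lt_irrefl r)
    have hcong : ∀ x ∈ l :: ls, (!(r :: rs).contains x) = (!rs.contains x) := by
      intro x hx
      have hne : x ≠ r := (hall x hx).ne'
      simp [hne]
    rw [bMerge]
    simp only [if_neg h, if_pos h']
    rw [ih hls hrs.tail]
    simp only [Prod.mk.injEq]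
    refine ⟨?_, ?_, ?_⟩
    · exact (List.filter_congr hcong).symm
    · rw [List.filter_cons_of_pos (by simp [hnm])]
    · rw [List.filter_cons_of_neg (by simp [hnm])]
  | case5 l ls r rs h h' ih =>
    have hv : l = r := by omega
    subst hv
    set tkl := ls.takeWhile (fun x => x == l) with htkl
    set ls' := ls.dropWhile (fun x => x == l) with hls'
    set tkr := (l :: rs).takeWhile (fun x => x == l) with htkr
    set rs' := (l :: rs).dropWhile (fun x => x == l) with hrs'
    have hlsdec : ls = tkl ++ ls' := (List.takeWhile_append_dropWhile).symm
    have hrsdec : l :: rs = tkr ++ rs' := (List.takeWhile_append_dropWhile).symm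
    have htkl_eq : ∀ x ∈ tkl, x = l := by
      intro x hx; rw [htkl] at hx
      simpa using List.mem_takeWhile_imp hx
    have htkr_eq : ∀ x ∈ tkr, x = l := by
      intro x hx; rw [htkr] at hx
      simpa using List.mem_takeWhile_imp hx
    have hls'_gt : ∀ x ∈ ls', l < x :=
      gt_of_mem_dropWhile l ls hls.tail (fun x hx => List.rel_of_pairwise_cons hls hx)
    have hrs'_gt : ∀ x ∈ rs', l < x := by
      refine gt_of_mem_dropWhile l (l :: rs) hrs (fun x hx => ?_)
      rcases List.mem_cons.mp hx with rfl | hx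
      · exact le_refl x
      · exact List.rel_of_pairwise_cons hrs hx
    have hP : List.Pairwise (· ≤ ·) ls' := hls.tail.sublist (List.dropWhile_sublist _)
    have hQ : List.Pairwise (· ≤ ·) rs' := hrs.sublist (List.dropWhile_sublist _)
    -- membership transfer: for x > l, x ∈ the full list ↔ x ∈ the dropped suffix
    have hmemL : ∀ x : Int, l < x → ((l :: ls).contains x) = (ls'.contains x) := by
      intro x hx
      have h2 : x ∉ tkl := fun hm => hx.ne' (htkl_eq x hm)
      rw [show (l :: ls) = l :: (tkl ++ ls') from by rw [← hlsdec]]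
      simp [hx.ne', h2]
    have hmemR : ∀ x : Int, l < x → ((l :: rs).contains x) = (rs'.contains x) := by
      intro x hx
      have h2 : x ∉ tkr := fun hm => hx.ne' (htkr_eq x hm)
      rw [hrsdec]
      simp [h2]
    have hlmemR : (l :: rs).contains l = true := by simp
    have hlmemL : (l :: ls).contains l = true := by simp
    rw [bMerge]
    simp only [if_neg h]
    rw [ih hP hQ]
    simp only [Prod.mk.injEq]
    have c1 : (l :: ls).filter (fun x => !(l :: rs).contains x)
        = ls'.filter (fun x => !rs'.contains x) := by
      rw [show (l :: ls) = l :: (tkl ++ ls') from by rw [← hlsdec]]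
      rw [List.filter_cons_of_neg (by simp)]
      rw [List.filter_append]
      have e1 : tkl.filter (fun x => !(l :: rs).contains x) = [] :=
        List.filter_eq_nil_iff.mpr (fun x hx => by simp [htkl_eq x hx])
      rw [e1, List.nil_append]
      exact List.filter_congr (fun x hx => by rw [hmemR x (hls'_gt x hx)])
    have c2 : (l :: rs).filter (fun x => !(l :: ls).contains x)
        = rs'.filter (fun x => !ls'.contains x) := by
      conv_lhs => rw [hrsdec]
      rw [List.filter_append]
      have e1 : tkr.filter (fun x => !(l :: ls).contains x) = [] :=
        List.filter_eq_nil_iff.mpr (fun x hx => by simp [htkr_eq x hx])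
      rw [e1, List.nil_append]
      exact List.filter_congr (fun x hx => by rw [hmemL x (hrs'_gt x hx)])
    have c3 : (l :: rs).filter (fun x => (l :: ls).contains x)
        = tkr ++ rs'.filter (fun x => ls'.contains x) := by
      conv_lhs => rw [hrsdec]
      rw [List.filter_append]
      have e1 : tkr.filter (fun x => (l :: ls).contains x) = tkr :=
        List.filter_eq_self.mpr (fun x hx => by simp [htkr_eq x hx])
      rw [e1]
      congr 1
      exact List.filter_congr (fun x hx => hmemL x (hrs'_gt x hx))
    refine ⟨c1.symm, c2.symm, ?_⟩
    rw [c3, List.length_append]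
    push_cast
    ring

theorem greedy_eq (NR : List Int) : ∀ (T D att : List Int),
    NR.Pairwise (· ≤ ·) → T.Pairwise (· ≤ ·) →
    (∀ x ∈ T, ∀ r ∈ NR, x ≠ r) →
    (∀ d ∈ D, ∀ r ∈ NR, d < r - 1) →
    ((NR.foldl aGreedy (att, D ++ T)).1.length : Int) = (att.length : Int) + bLend T NR := by
  induction NR with
  | nil => intro T D att _ _ _ _; simp [bLend_nil_right]
  | cons r NR ih =>
    intro T
    induction T with
    | nil =>
      intro D att hNR _ _ hD
      have hc1 : (D ++ ([] : List Int)).contains (r - 1) = false := by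
        rw [Bool.eq_false_iff]; intro hc
        have := hD _ (by simpa using List.contains_iff_mem.mp hc) r (by simp)
        omega
      have hc2 : (D ++ ([] : List Int)).contains (r + 1) = false := by
        rw [Bool.eq_false_iff]; intro hc
        have := hD _ (by simpa using List.contains_iff_mem.mp hc) r (by simp)
        omega
      have hstep : aGreedy (att, D ++ ([] : List Int)) r = (att, D ++ ([] : List Int)) := by
        simp only [aGreedy, hc1, hc2, Bool.false_eq_true, if_false]
      rw [List.foldl_cons, hstep,
        ih [] D att hNR.tail (by simp) (by simp)
          (fun d hd r' hr' => hD d hd r' (by simp [hr']))]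
      simp [bLend]
    | cons hd T ihT =>
      intro D att hNR hT hdis hD
      have hne_r : hd ≠ r := hdis hd (by simp) r (by simp)
      have hT_ge : ∀ x ∈ T, hd ≤ x := fun x hx => List.rel_of_pairwise_cons hT hx
      have hDlt : ∀ d ∈ D, d < r - 1 := fun d hd' => hD d hd' r (by simp)
      by_cases h1 : hd < r - 1
      · -- dead head: move hd into the dead prefix
        have hmove : D ++ hd :: T = (D ++ [hd]) ++ T := by simp
        rw [hmove]
        rw [ihT (D ++ [hd]) att hNR hT.tail
          (fun x hx r' hr' => hdis x (by simp [hx]) r' hr')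
          (by
            intro d hd' r' hr'
            rcases List.mem_append.mp hd' with h | h
            · exact hD d h r' hr'
            · have hle : r ≤ r' := by
                rcases List.mem_cons.mp hr' with rfl | hr''
                · exact le_refl r'
                · exact List.rel_of_pairwise_cons hNR hr''
              have : d = hd := by simpa using h
              omega)]
        have : bLend (hd :: T) (r :: NR) = bLend T (r :: NR) := by
          rw [bLend]; simp [h1]
        rw [this]
      · by_cases h2 : hd = r - 1
        · -- lend from r - 1
          have hmem : (r - 1) ∈ D ++ hd :: T := by simp [← h2]
          have hcont : (D ++ hd :: T).contains (r - 1) = true :=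
            List.contains_iff_mem.mpr hmem
          have hnD : (r - 1) ∉ D := fun hmm => by have := hDlt _ hmm; omega
          have herase : (D ++ hd :: T).erase (r - 1) = D ++ T := by
            rw [List.erase_append_right _ hnD, ← h2, List.erase_cons_head]
          have hstep : aGreedy (att, D ++ hd :: T) r = (att ++ [r - 1], D ++ T) := by
            simp only [aGreedy, hcont, if_true]
            rw [PySem.List.remove?_eq_some_erase _ _ hmem]
            simp [herase]
          rw [List.foldl_cons, hstep,
            ih T D (att ++ [r - 1]) hNR.tail hT.tail
              (fun x hx r' hr' => hdis x (by simp [hx]) r' (by simp [hr']))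
              (fun d hd' r' hr' => by
                have hle : r ≤ r' := List.rel_of_pairwise_cons hNR hr'
                have := hDlt d hd'
                omega)]
          have : bLend (hd :: T) (r :: NR) = 1 + bLend T NR := by
            rw [bLend]; simp [h2]
          rw [this]
          simp only [List.length_append, List.length_cons, List.length_nil]
          push_cast
          ring
        · by_cases h3 : hd = r + 1
          · -- lend from r + 1
            have hgt : ∀ x ∈ hd :: T, r - 1 < x := by
              intro x hx
              rcases List.mem_cons.mp hx with rfl | hx
              · omega
              · have := hT_ge x hx; omega
            have hc1 : (D ++ hd :: T).contains (r - 1) = false := by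
              rw [Bool.eq_false_iff]; intro hc
              rcases List.mem_append.mp (List.contains_iff_mem.mp hc) with hmm | hmm
              · have := hDlt _ hmm; omega
              · have := hgt _ hmm; omega
            have hmem : (r + 1) ∈ D ++ hd :: T := by simp [← h3]
            have hcont : (D ++ hd :: T).contains (r + 1) = true :=
              List.contains_iff_mem.mpr hmem
            have hnD : (r + 1) ∉ D := fun hmm => by have := hDlt _ hmm; omega
            have herase : (D ++ hd :: T).erase (r + 1) = D ++ T := by
              rw [List.erase_append_right _ hnD, ← h3, List.erase_cons_head]
            have hstep : aGreedy (att, D ++ hd :: T) r = (att ++ [r + 1], D ++ T) := by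
              simp only [aGreedy, hc1, Bool.false_eq_true, if_false, hcont, if_true]
              rw [PySem.List.remove?_eq_some_erase _ _ hmem]
              simp [herase]
            rw [List.foldl_cons, hstep,
              ih T D (att ++ [r + 1]) hNR.tail hT.tail
                (fun x hx r' hr' => hdis x (by simp [hx]) r' (by simp [hr']))
                (fun d hd' r' hr' => by
                  have hle : r ≤ r' := List.rel_of_pairwise_cons hNR hr'
                  have := hDlt d hd'
                  omega)]
            have : bLend (hd :: T) (r :: NR) = 1 + bLend T NR := by
              rw [bLend, if_neg h1, if_pos (by simp [h3])]
            rw [this]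
            simp only [List.length_append, List.length_cons, List.length_nil]
            push_cast
            ring
          · -- hd > r + 1: no lender match at r
            have h4 : r + 1 < hd := by omega
            have hgt : ∀ x ∈ hd :: T, r + 1 < x := by
              intro x hx
              rcases List.mem_cons.mp hx with rfl | hx
              · exact h4
              · have := hT_ge x hx; omega
            have hc1 : (D ++ hd :: T).contains (r - 1) = false := by
              rw [Bool.eq_false_iff]; intro hc
              rcases List.mem_append.mp (List.contains_iff_mem.mp hc) with hmm | hmm
              · have := hDlt _ hmm; omega
              · have := hgt _ hmm; omega
            have hc2 : (D ++ hd :: T).contains (r + 1) = false := by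
              rw [Bool.eq_false_iff]; intro hc
              rcases List.mem_append.mp (List.contains_iff_mem.mp hc) with hmm | hmm
              · have := hDlt _ hmm; omega
              · have := hgt _ hmm; omega
            have hstep : aGreedy (att, D ++ hd :: T) r = (att, D ++ hd :: T) := by
              simp only [aGreedy, hc1, hc2, Bool.false_eq_true, if_false]
            rw [List.foldl_cons, hstep,
              ih (hd :: T) D att hNR.tail hT
                (fun x hx r' hr' => hdis x hx r' (by simp [hr']))
                (fun d hd' r' hr' => by
                  have hle : r ≤ r' := List.rel_of_pairwise_cons hNR hr'
                  have := hDlt d hd'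
                  omega)]
            have : bLend (hd :: T) (r :: NR) = bLend (hd :: T) NR := by
              rw [bLend]; simp [h1, h2, h3]
            rw [this]

theorem range_count_eq (n : Int) (L : List Int) :
    ((PySem.List.pyRange 1 (n + 1) 1).filter (fun i => L.contains i)).length
      = (L.toFinset.filter (fun x => 1 ≤ x ∧ x ≤ n)).card := by
  have hnd : ((PySem.List.pyRange 1 (n + 1) 1).filter (fun i => L.contains i)).Nodup :=
    (PySem.List.nodup_pyRange_one 1 (n + 1)).filter _
  rw [← List.toFinset_card_of_nodup hnd]
  congr 1
  ext x
  simp [PySem.List.mem_pyRange_one]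
  constructor
  · rintro ⟨⟨h1, h2⟩, h3⟩; exact ⟨h3, h1, by omega⟩
  · rintro ⟨h3, h1, h2⟩; exact ⟨⟨h1, by omega⟩, h3⟩

theorem scan_eq (n : Int) (L : List Int) : ∀ (p : Option Int) (c : Int),
    L.Pairwise (· ≤ ·) → (∀ x ∈ L, ∀ y, p = some y → y ≤ x) →
    (L.foldl
      (fun (s : Option Int × Int) x =>
        if (1 ≤ x ∧ x ≤ n) ∧ some x ≠ s.1 then (some x, s.2 + 1) else (some x, s.2))
      (p, c)).2
    = c + (((L.toFinset.filter (fun x => 1 ≤ x ∧ x ≤ n)) \ (p.elim ∅ (fun y => {y}))).card : Int) := by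
  induction L with
  | nil => intro p c _ _; simp
  | cons a L ih =>
    intro p c hs hp
    have hL_ge : ∀ x ∈ L, a ≤ x := fun x hx => List.rel_of_pairwise_cons hs hx
    rw [List.foldl_cons]
    by_cases hpa : p = some a
    · -- head equals prev: not counted, and it is removed from the finset either way
      have hcond : ¬ ((1 ≤ a ∧ a ≤ n) ∧ some a ≠ p) := by simp [hpa]
      rw [if_neg hcond]
      rw [ih (some a) c hs.tail (fun x hx y hy => by
        cases hy with | refl => exact hL_ge x hx
        )]
      subst hpa
      simp only [Option.elim]
      congr 2
      rw [List.toFinset_cons, Finset.filter_insert]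
      by_cases hq : 1 ≤ a ∧ a ≤ n
      · rw [if_pos hq, Finset.insert_sdiff_of_mem _ (by simp)]
      · rw [if_neg hq]
    · -- fresh value: some x ≠ p holds
      have hPdisj : ((a :: L).toFinset.filter (fun x => 1 ≤ x ∧ x ≤ n)) \ (p.elim ∅ (fun y => {y}))
          = (a :: L).toFinset.filter (fun x => 1 ≤ x ∧ x ≤ n) := by
        cases p with
        | none => simp
        | some y =>
          simp only [Option.elim]
          rw [Finset.sdiff_eq_self_iff_disjoint]
          rw [Finset.disjoint_singleton_right]
          intro hy
          have hy' := Finset.mem_filter.mp hy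
          have hymem : y ∈ a :: L := by simpa using hy'.1
          have hya : y ≠ a := fun h => hpa (by rw [h])
          rcases List.mem_cons.mp hymem with rfl | hyL
          · exact hya rfl
          · have h1 : a ≤ y := hL_ge y hyL
            have h2 : y ≤ a := hp a (by simp) y rfl
            exact hya (le_antisymm h2 h1)
      by_cases hq : 1 ≤ a ∧ a ≤ n
      · rw [if_pos ⟨hq, fun h => hpa h.symm⟩]
        rw [ih (some a) (c + 1) hs.tail (fun x hx y hy => by
          cases hy with | refl => exact hL_ge x hx
          )]
        rw [hPdisj]
        simp only [Option.elim, List.toFinset_cons, Finset.filter_insert, if_pos hq,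
          Finset.sdiff_singleton_eq_erase]
        set X := L.toFinset.filter (fun x => 1 ≤ x ∧ x ≤ n) with hX
        by_cases haX : a ∈ X
        · rw [Finset.insert_eq_self.mpr haX]
          have h1 : (X.erase a).card = X.card - 1 := Finset.card_erase_of_mem haX
          have h2 : 1 ≤ X.card := Finset.card_pos.mpr ⟨a, haX⟩
          rw [h1]
          push_cast [Nat.cast_sub h2]
          ring
        · rw [Finset.card_insert_of_notMem haX, Finset.erase_eq_of_notMem haX]
          push_cast
          ring
      · rw [if_neg (fun h => hq h.1)]
        rw [ih (some a) c hs.tail (fun x hx y hy => by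
          cases hy with | refl => exact hL_ge x hx
          )]
        rw [hPdisj]
        simp only [Option.elim, List.toFinset_cons, Finset.filter_insert, if_neg hq,
          Finset.sdiff_singleton_eq_erase]
        rw [Finset.erase_eq_of_notMem (fun hmm : a ∈ L.toFinset.filter (fun x => 1 ≤ x ∧ x ≤ n) => hq (Finset.mem_filter.mp hmm).2)]

-- a list's length splits into the matching and non-matching parts of a filter
theorem filter_length_split (l : List Int) (p : Int → Bool) :
    (l.filter p).length + (l.filter (fun x => !p x)).length = l.length := by
  rw [← List.countP_eq_length_filter, ← List.countP_eq_length_filter]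
  have := (List.length_eq_countP_add_countP (l := l) (p := p)).symm
  simpa using this

-- ===== VERDICT (by name: the statement is the Claim_ definition above) =====
theorem solution_spec : Claim_equal_solution := by
  intro n lost reverse _
  unfold Spec_solution
  simp only [solution, solution_alt]
  set L := PySem.List.sorted lost (fun x => x) false with hLdef
  set R := PySem.List.sorted reverse (fun x => x) false with hRdef
  have hL : L.Pairwise (· ≤ ·) := by
    have := PySem.List.sorted_pairwise (xs := lost) (key := fun x => x) (κ := Int)
    simpa [hLdef] using this
  have hR : R.Pairwise (· ≤ ·) := by
    have := PySem.List.sorted_pairwise (xs := reverse) (key := fun x => x) (κ := Int)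
    simpa [hRdef] using this
  rw [aStep1_foldl, PySem.List.foldl_append_if_eq_filter]
  rw [bMerge_eq L R hL hR]
  rw [scan_eq n L none 0 hL (by simp)]
  set att0 := (PySem.List.pyRange 1 (n + 1) 1).filter (fun i => !(L.contains i)) with hatt0
  set NL := L.filter (fun x => !(R.contains x)) with hNL
  set NR := R.filter (fun x => !(L.contains x)) with hNR
  have hdisj : ∀ x ∈ NL, ∀ r ∈ NR, x ≠ r := by
    intro x hx r hr he
    have hx' := List.mem_filter.mp hx
    have hr' := List.mem_filter.mp hr
    rw [← he] at hr'
    have hnot : x ∉ L := by simpa using hr'.2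
    exact hnot hx'.1
  have hgreedy := greedy_eq NR NL [] (att0 ++ R.filter (fun i => L.contains i))
    (hR.filter _) (hL.filter _) hdisj (by simp)
  simp only [List.nil_append] at hgreedy
  simp only [List.nil_append]
  rw [hgreedy]
  have hrc := range_count_eq n L
  have hsplit := filter_length_split (PySem.List.pyRange 1 (n + 1) 1) (fun i => L.contains i)
  have hlen : ((PySem.List.pyRange 1 (n + 1) 1).length : Int) = max n 0 := by
    rw [PySem.List.length_pyRange_one]
    rw [Int.toNat_eq_max]
    norm_num
  rw [hatt0] at *
  simp only [Option.elim_none, Finset.sdiff_empty, List.length_append]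
  rw [hrc] at hsplit
  push_cast at hsplit hlen ⊢
  omega
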